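-- pv_equiv track=rewrite | github.com/baby1900/CodingProblems | codingProblems/DailyCodingProblems/Data Structures/Arrays/numberOfSmallerElementsToTheRight.py | smaller_counts
-- ===== SOURCE A (Python) =====
-- def smaller_counts(lst):
--     n = len(lst)
--     if n == 1:
--         return [0]
--     result = [0 for i in range(n)]
--     for pos in range(n - 2, -1, -1):
--         for currpos in range(pos + 1, n):
--             if lst[pos] > lst[currpos]:
--                 result[pos] = result[currpos] + 1
--                 break
--     return result
-- ===== SOURCE B (Python) =====
-- def smaller_counts(lst):
--     # Monotonic stack of (value, chain_count): one right-to-left pass, O(n).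
--     stack = []
--     out = []
--     for x in reversed(lst):
--         while stack and stack[-1][0] >= x:
--             stack.pop()
--         c = stack[-1][1] + 1 if stack else 0
--         stack.append((x, c))
--         out.append(c)
--     out.reverse()
--     return out
-- ===== Notes on version B (the rewrite author's own statement) =====
-- stated objective: faster
-- what changed: Replaced A's backward outer loop with a linear forward-from-the-right rescan of the suffix per position (break on first smaller) by a single right-to-left pass maintaining a monotonic stack of (value, chain-count) pairs, so the first-smaller-to-the-right element and its already-computed count are found by popping instead of rescanning.
import Mathlib
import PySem

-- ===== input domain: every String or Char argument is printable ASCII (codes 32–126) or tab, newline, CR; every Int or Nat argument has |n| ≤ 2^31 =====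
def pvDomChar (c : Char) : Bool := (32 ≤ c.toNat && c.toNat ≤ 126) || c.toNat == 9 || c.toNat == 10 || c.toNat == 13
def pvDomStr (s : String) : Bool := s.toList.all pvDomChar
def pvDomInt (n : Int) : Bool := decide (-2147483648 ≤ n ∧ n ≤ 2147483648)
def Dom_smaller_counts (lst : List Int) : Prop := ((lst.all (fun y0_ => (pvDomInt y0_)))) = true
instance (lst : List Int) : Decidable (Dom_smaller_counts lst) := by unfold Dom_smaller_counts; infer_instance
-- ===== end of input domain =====

-- B replaces A's quadratic rescans of the suffix with one right-to-left monotonic-stack pass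
-- (objective: faster, O(n^2) -> O(n)); return value only, neither version mutates its argument.

-- ===== PORT A =====
-- inner loop 'for currpos in range(pos+1, n): if lst[pos] > lst[currpos]: result[pos] = result[currpos]+1; break'
-- (indices produced by range are always in range, so pyGetD's default 0 is never used)
def smallerCountsInner (lst : List Int) (pos : Int) : List Int → List Int → List Int
  | result, [] => result
  | result, currpos :: rest =>
    if PySem.List.pyGetD lst pos 0 > PySem.List.pyGetD lst currpos 0 then
      PySem.List.pySetD result pos (PySem.List.pyGetD result currpos 0 + 1)
    else smallerCountsInner lst pos result rest

def smaller_counts (lst : List Int) : List Int :=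
  let n : Int := lst.length
  if n = 1 then [0]
  else
    let result : List Int := (PySem.List.pyRange 0 n 1).map (fun _ => 0)
    (PySem.List.pyRange (n - 2) (-1) (-1)).foldl
      (fun result pos => smallerCountsInner lst pos result (PySem.List.pyRange (pos + 1) n 1))
      result

-- ===== PORT B =====
-- 'while stack and stack[-1][0] >= x: stack.pop()' ; stack top is the list head
def altPop (x : Int) : List (Int × Int) → List (Int × Int)
  | [] => []
  | (v, c) :: rest => if v ≥ x then altPop x rest else (v, c) :: rest

def altStep (st : List (Int × Int) × List Int) (x : Int) : List (Int × Int) × List Int :=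
  let stack := altPop x st.1
  let c : Int := match stack with | [] => 0 | (_, c0) :: _ => c0 + 1
  ((x, c) :: stack, st.2 ++ [c])

def smaller_counts_alt (lst : List Int) : List Int :=
  (lst.reverse.foldl altStep ([], [])).2.reverse

-- ===== PRECONDITION & SPEC =====
def Spec_smaller_counts (lst : List Int) (out : List Int) : Prop := out = smaller_counts_alt lst
instance (lst : List Int) (out : List Int) : Decidable (Spec_smaller_counts lst out) := by unfold Spec_smaller_counts; infer_instance

-- ===== CLAIM (what is proved, stated in full; the proofs are below) =====
def Claim_equal_smaller_counts : Prop := ∀ (lst : List Int), Dom_smaller_counts lst → Spec_smaller_counts lst (smaller_counts lst)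

-- ===== LEMMAS AND PROOFS =====

-- Functional specification: chainSpec lst lists, for each position, the length of the
-- next-smaller-to-the-right chain starting there (0 if no smaller element follows).
def chainCount (x : Int) : List (Int × Int) → Int
  | [] => 0
  | (y, c) :: rest => if x > y then c + 1 else chainCount x rest

def chainSpec : List Int → List Int
  | [] => []
  | x :: xs => chainCount x (xs.zip (chainSpec xs)) :: chainSpec xs

theorem length_chainSpec (l : List Int) : (chainSpec l).length = l.length := by
  induction l with
  | nil => rfl
  | cons x xs ih => simp [chainSpec, ih]

-- ---- B = chainSpec ----

def stackOf : List Int → List (Int × Int)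
  | [] => []
  | x :: xs => (x, chainCount x (xs.zip (chainSpec xs))) :: altPop x (stackOf xs)

theorem chainCount_altPop (x y : Int) (h : x ≤ y) (st : List (Int × Int)) :
    chainCount x (altPop y st) = chainCount x st := by
  induction st with
  | nil => rfl
  | cons p rest ih =>
    obtain ⟨v, c⟩ := p
    by_cases hv : v ≥ y
    · have : ¬ x > v := by omega
      simp [altPop, hv, chainCount, this, ih]
    · simp [altPop, hv]

theorem chainCount_stackOf (x : Int) (xs : List Int) :
    chainCount x (stackOf xs) = chainCount x (xs.zip (chainSpec xs)) := by
  induction xs with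
  | nil => rfl
  | cons y ys ih =>
    by_cases hxy : x > y
    · simp [stackOf, chainCount, chainSpec, hxy]
    · have hle : x ≤ y := by omega
      simp [stackOf, chainCount, chainSpec, hxy, chainCount_altPop x y hle, ih]

theorem altStep_peek (x : Int) (st : List (Int × Int)) :
    (match altPop x st with | [] => (0 : Int) | (_, c0) :: _ => c0 + 1) = chainCount x st := by
  induction st with
  | nil => rfl
  | cons p rest ih =>
    obtain ⟨v, c⟩ := p
    by_cases hv : v ≥ x
    · have : ¬ x > v := by omega
      simp only [altPop, if_pos hv, chainCount, if_neg this, ih]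
    · have : x > v := by omega
      simp only [altPop, if_neg hv, chainCount, if_pos this]

theorem altFoldr (xs : List Int) :
    xs.foldr (fun x s => altStep s x) (([] : List (Int × Int)), ([] : List Int))
      = (stackOf xs, (chainSpec xs).reverse) := by
  induction xs with
  | nil => rfl
  | cons x t ih =>
    rw [List.foldr_cons, ih]
    simp only [altStep]
    rw [altStep_peek x (stackOf t), chainCount_stackOf x t]
    simp only [stackOf, chainSpec, List.reverse_cons]

theorem alt_eq_chainSpec (lst : List Int) : smaller_counts_alt lst = chainSpec lst := by
  unfold smaller_counts_alt
  rw [List.foldl_reverse, altFoldr, List.reverse_reverse]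

-- ---- A = chainSpec ----

def auxFind (x : Int) : List (Int × Int) → Option Int
  | [] => none
  | (y, c) :: rest => if x > y then some (c + 1) else auxFind x rest

theorem chainCount_eq_auxFind (x : Int) (l : List (Int × Int)) :
    chainCount x l = (auxFind x l).getD 0 := by
  induction l with
  | nil => rfl
  | cons p rest ih =>
    obtain ⟨y, c⟩ := p
    by_cases h : x > y <;> simp [chainCount, auxFind, h, ih]

-- the inner scan over range(j, n) is auxFind over the zipped suffixes
theorem inner_eq (lst res : List Int) (i : Int) (hres : res.length = lst.length) :
    ∀ (k j : Nat), lst.length = j + k →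
    smallerCountsInner lst i res (PySem.List.pyRange (j : Int) (lst.length : Int) 1)
      = match auxFind (PySem.List.pyGetD lst i 0) ((lst.drop j).zip (res.drop j)) with
        | some v => PySem.List.pySetD res i v
        | none => res := by
  intro k
  induction k with
  | zero =>
    intro j hj
    rw [PySem.List.pyRange_one_eq_nil (by omega)]
    have : lst.drop j = [] := by
      apply List.drop_eq_nil_of_le; omega
    simp [this, smallerCountsInner, auxFind]
  | succ k ih =>
    intro j hj
    have hjlen : j < lst.length := by omega
    have hjres : j < res.length := by omega
    rw [PySem.List.pyRange_one_cons (by exact_mod_cast by omega)]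
    have hdl : lst.drop j = lst[j] :: lst.drop (j + 1) := List.drop_eq_getElem_cons hjlen
    have hdr : res.drop j = res[j] :: res.drop (j + 1) := List.drop_eq_getElem_cons hjres
    have hgl : PySem.List.pyGetD lst (j : Int) 0 = lst[j] := by
      rw [PySem.List.pyGetD_natCast]; exact List.getD_eq_getElem _ _ hjlen
    have hgr : PySem.List.pyGetD res (j : Int) 0 = res[j] := by
      rw [PySem.List.pyGetD_natCast]; exact List.getD_eq_getElem _ _ hjres
    rw [hdl, hdr, List.zip_cons_cons]
    by_cases hc : PySem.List.pyGetD lst i 0 > lst[j]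
    · simp only [smallerCountsInner, hgl, hgr]
      rw [if_pos hc]
      simp only [auxFind]
      rw [if_pos hc]
    · have h1 : ((j : Int) + 1) = ((j + 1 : Nat) : Int) := by push_cast; ring
      simp only [smallerCountsInner, hgl, hgr]
      rw [if_neg hc, h1, ih (j + 1) (by omega)]
      simp only [auxFind]
      rw [if_neg hc]

-- one outer-loop step at position i turns R (i+1) into R i, where
-- R i = i zeros followed by the already-computed chain counts of the suffix
theorem outer_step (lst : List Int) (i : Nat) (hi : i < lst.length) :
    smallerCountsInner lst (i : Int)
        (List.replicate (i + 1) 0 ++ chainSpec (lst.drop (i + 1)))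
        (PySem.List.pyRange ((i : Int) + 1) (lst.length : Int) 1)
      = List.replicate i 0 ++ chainSpec (lst.drop i) := by
  set res := List.replicate (i + 1) 0 ++ chainSpec (lst.drop (i + 1)) with hresdef
  have hreslen : res.length = lst.length := by
    simp [hresdef, length_chainSpec]; omega
  have hdropres : res.drop (i + 1) = chainSpec (lst.drop (i + 1)) := by
    rw [hresdef]
    have h := List.drop_left (l₁ := List.replicate (i + 1) (0 : Int))
      (l₂ := chainSpec (lst.drop (i + 1)))
    simp only [List.length_replicate] at h
    exact h
  have h1 : ((i : Int) + 1) = ((i + 1 : Nat) : Int) := by push_cast; ring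
  rw [h1, inner_eq lst res (i : Int) hreslen (lst.length - (i + 1)) (i + 1) (by omega)]
  have hgl : PySem.List.pyGetD lst (i : Int) 0 = lst[i] := by
    rw [PySem.List.pyGetD_natCast]; exact List.getD_eq_getElem _ _ hi
  have hdi : lst.drop i = lst[i] :: lst.drop (i + 1) := List.drop_eq_getElem_cons hi
  have hrepl : List.replicate (i + 1) (0 : Int) = List.replicate i 0 ++ [0] :=
    List.replicate_succ'

  rw [hgl, hdropres, hdi]
  have hcc : chainSpec (lst[i] :: lst.drop (i + 1))
      = chainCount lst[i] ((lst.drop (i + 1)).zip (chainSpec (lst.drop (i + 1))))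
        :: chainSpec (lst.drop (i + 1)) := rfl
  rw [hcc, chainCount_eq_auxFind]
  cases hfind : auxFind lst[i] ((lst.drop (i + 1)).zip (chainSpec (lst.drop (i + 1)))) with
  | none =>
    simp only [Option.getD_none]
    rw [hresdef, hrepl]
    simp
  | some v =>
    simp only [Option.getD_some]
    rw [hresdef, hrepl, PySem.List.pySetD_natCast, List.append_assoc,
      List.set_append_right _ _ (by simp)]
    simp

theorem outer_fold (lst : List Int) :
    ∀ (i : Nat), i ≤ lst.length →
    (PySem.List.pyRange ((i : Int) - 1) (-1) (-1)).foldl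
        (fun result pos =>
          smallerCountsInner lst pos result (PySem.List.pyRange (pos + 1) (lst.length : Int) 1))
        (List.replicate i 0 ++ chainSpec (lst.drop i))
      = chainSpec lst := by
  intro i
  induction i with
  | zero =>
    intro _
    rw [PySem.List.pyRange_neg_one_eq_nil (by norm_num)]
    simp
  | succ i ih =>
    intro hi
    have h1 : ((i + 1 : Nat) : Int) - 1 = (i : Nat) := by push_cast; ring
    rw [h1, PySem.List.pyRange_neg_one_cons (by exact_mod_cast by omega)]
    simp only [List.foldl_cons]
    rw [outer_step lst i (by omega)]
    have h2 : ((i : Int) - 1) = ((i : Nat) : Int) - 1 := by norm_num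
    rw [h2] at *
    exact ih (by omega)

theorem a_eq_chainSpec (lst : List Int) : smaller_counts lst = chainSpec lst := by
  unfold smaller_counts
  by_cases h1 : (lst.length : Int) = 1
  · have hl : lst.length = 1 := by exact_mod_cast h1
    obtain ⟨a, rfl⟩ : ∃ a, lst = [a] := by
      cases lst with
      | nil => simp at hl
      | cons a t =>
        cases t with
        | nil => exact ⟨a, rfl⟩
        | cons b t' => simp at hl
    simp [chainSpec, chainCount]
  · simp only [if_neg h1]
    by_cases h0 : lst = []
    · subst h0
      rw [PySem.List.pyRange_neg_one_eq_nil (by norm_num)]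
      rfl
    · -- n ≥ 2 here; the initial all-zero array is R (n-1)
      obtain ⟨m, hm⟩ : ∃ m, lst.length = m + 1 :=
        ⟨lst.length - 1, by cases lst with | nil => exact absurd rfl h0 | cons a t => simp⟩
      have hinit : (PySem.List.pyRange 0 (lst.length : Int) 1).map (fun _ => (0 : Int))
          = List.replicate m 0 ++ chainSpec (lst.drop m) := by
        have hdrop : ∃ a, lst.drop m = [a] := by
          have hlen1 : (lst.drop m).length = 1 := by simp [hm]
          cases hd : lst.drop m with
          | nil => rw [hd] at hlen1; simp at hlen1
          | cons a t =>
            rw [hd] at hlen1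
            cases t with
            | nil => exact ⟨a, rfl⟩
            | cons b t' => simp at hlen1
        obtain ⟨a, ha⟩ := hdrop
        rw [ha]
        have : chainSpec [a] = [0] := by simp [chainSpec, chainCount]
        rw [this]
        rw [List.map_const']
        simp only [PySem.List.length_pyRange_one, hm]
        have h4 : ((((m + 1 : Nat)) : Int) - 0).toNat = m + 1 := by simp
        rw [h4]
        have h5 : List.replicate (m + 1) (0 : Int) = List.replicate m 0 ++ [0] :=
          List.replicate_succ'
        rw [h5]
      rw [hinit]
      have h2 : (lst.length : Int) - 2 = ((m : Nat) : Int) - 1 := by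
        rw [hm]; push_cast; ring
      rw [h2]
      exact outer_fold lst m (by omega)

-- ===== VERDICT (by name: the statement is the Claim_ definition above) =====
theorem smaller_counts_spec : Claim_equal_smaller_counts := by
  intro lst _
  unfold Spec_smaller_counts
  rw [a_eq_chainSpec, alt_eq_chainSpec]
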